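-- pv_equiv track=rewrite | github.com/AshokRajuDatla99/neuralnetcodes | pnn.py | loop
-- ===== SOURCE A (Python) =====
-- def neighbours(char, i, j):
--     sum = 0
--     for k in range(i - 1, i + 2):
--         for l in range(j - 1, j + 2):
--             sum += char[k][l]
--
--     return sum
--
-- def tp_joint(char, i, j):
--     sum = char[i - 1][j] + char[i + 1][j] + char[i][j - 1] + char[i][j + 1]
--     if sum >= 3:
--         return 1
--     return 0
--
-- def loop(char):
--     # 8 cols and 10 rows
--     two_nei = 0
--     tj = 0
--     for i in range(1, len(char) - 1):
--         for j in range(1, len(char[i]) - 1):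
--             if char[i][j] != 0:
--                 nei = neighbours(char, i, j)
--                 tj += tp_joint(char, i, j)
--
--                 if (nei == 2):
--                     two_nei += 1
--
--     return two_nei,tj
-- ===== SOURCE B (Python) =====
-- def loop(char):
--     # Precompute per-row prefix sums once; each 3x3 neighbourhood sum is then
--     # three O(1) prefix differences instead of a 9-iteration nested loop.
--     pre = []
--     for row in char:
--         acc = 0
--         p = [0]
--         for v in row:
--             acc += v
--             p.append(acc)
--         pre.append(p)
--     two_nei = 0
--     tj = 0
--     for i in range(1, len(char) - 1):
--         row = char[i]
--         for j in range(1, len(row) - 1):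
--             if row[j] != 0:
--                 nei = (pre[i - 1][j + 2] - pre[i - 1][j - 1]
--                        + pre[i][j + 2] - pre[i][j - 1]
--                        + pre[i + 1][j + 2] - pre[i + 1][j - 1])
--                 if nei == 2:
--                     two_nei += 1
--                 joint = char[i - 1][j] + char[i + 1][j] + row[j - 1] + row[j + 1]
--                 if joint >= 3:
--                     tj += 1
--     return two_nei, tj
-- ===== Notes on version B (the rewrite author's own statement) =====
-- stated objective: alternative
-- what changed: B precomputes per-row prefix-sum tables once and obtains each 3x3 neighbourhood sum as three O(1) prefix differences, replacing A's nested 3x3 summation loop (with its range objects and repeated indexing) per cell.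
import Mathlib
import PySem

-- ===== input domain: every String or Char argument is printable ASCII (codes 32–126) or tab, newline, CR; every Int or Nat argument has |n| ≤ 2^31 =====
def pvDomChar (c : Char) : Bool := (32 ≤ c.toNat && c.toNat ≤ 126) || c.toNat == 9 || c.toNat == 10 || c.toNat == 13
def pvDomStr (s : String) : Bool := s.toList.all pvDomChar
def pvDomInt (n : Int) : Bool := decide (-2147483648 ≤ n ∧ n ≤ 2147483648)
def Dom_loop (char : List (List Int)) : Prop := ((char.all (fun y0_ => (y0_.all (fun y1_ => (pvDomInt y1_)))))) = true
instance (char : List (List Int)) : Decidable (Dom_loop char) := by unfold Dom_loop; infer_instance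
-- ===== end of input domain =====

-- B replaces A's per-cell 3x3 summation loop by per-row prefix-sum tables built once,
-- so each neighbourhood sum is three prefix differences (objective: alternative).

-- ===== PORT A =====
def neighbours (char : List (List Int)) (i j : Int) : Int :=
  (PySem.List.pyRange (i - 1) (i + 2) 1).foldl (fun s k =>
    (PySem.List.pyRange (j - 1) (j + 2) 1).foldl (fun s l =>
      s + PySem.List.pyGetD (PySem.List.pyGetD char k []) l 0) s) 0

def tp_joint (char : List (List Int)) (i j : Int) : Int :=
  let s := PySem.List.pyGetD (PySem.List.pyGetD char (i - 1) []) j 0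
         + PySem.List.pyGetD (PySem.List.pyGetD char (i + 1) []) j 0
         + PySem.List.pyGetD (PySem.List.pyGetD char i []) (j - 1) 0
         + PySem.List.pyGetD (PySem.List.pyGetD char i []) (j + 1) 0
  if s ≥ 3 then 1 else 0

-- pyGetD is exact here: inside Pre_loop every index A reads is in range (Python never raises).
def loop (char : List (List Int)) : Int × Int :=
  (PySem.List.pyRange 1 ((char.length : Int) - 1) 1).foldl (fun st i =>
    (PySem.List.pyRange 1 (((PySem.List.pyGetD char i []).length : Int) - 1) 1).foldl (fun st j =>
      if PySem.List.pyGetD (PySem.List.pyGetD char i []) j 0 ≠ 0 then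
        let nei := neighbours char i j
        let st1 : Int × Int := (st.1, st.2 + tp_joint char i j)
        if nei = 2 then (st1.1 + 1, st1.2) else st1
      else st) st) ((0 : Int), (0 : Int))

-- ===== PORT B =====
def prefixRow (row : List Int) : List Int :=
  (row.foldl (fun (st : Int × List Int) v => (st.1 + v, st.2 ++ [st.1 + v])) (0, [0])).2

def loop_alt (char : List (List Int)) : Int × Int :=
  let pre := char.foldl (fun acc row => acc ++ [prefixRow row]) []
  (PySem.List.pyRange 1 ((char.length : Int) - 1) 1).foldl (fun st i =>
    let row := PySem.List.pyGetD char i []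
    (PySem.List.pyRange 1 ((row.length : Int) - 1) 1).foldl (fun st j =>
      if PySem.List.pyGetD row j 0 ≠ 0 then
        let nei := PySem.List.pyGetD (PySem.List.pyGetD pre (i - 1) []) (j + 2) 0
                 - PySem.List.pyGetD (PySem.List.pyGetD pre (i - 1) []) (j - 1) 0
                 + PySem.List.pyGetD (PySem.List.pyGetD pre i []) (j + 2) 0
                 - PySem.List.pyGetD (PySem.List.pyGetD pre i []) (j - 1) 0
                 + PySem.List.pyGetD (PySem.List.pyGetD pre (i + 1) []) (j + 2) 0
                 - PySem.List.pyGetD (PySem.List.pyGetD pre (i + 1) []) (j - 1) 0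
        let st2 : Int × Int := if nei = 2 then (st.1 + 1, st.2) else st
        let joint := PySem.List.pyGetD (PySem.List.pyGetD char (i - 1) []) j 0
                   + PySem.List.pyGetD (PySem.List.pyGetD char (i + 1) []) j 0
                   + PySem.List.pyGetD row (j - 1) 0
                   + PySem.List.pyGetD row (j + 1) 0
        if joint ≥ 3 then (st2.1, st2.2 + 1) else st2
      else st) st) ((0 : Int), (0 : Int))

-- ===== PRECONDITION & SPEC =====
-- Pre_loop excludes exactly the inputs on which Python A raises IndexError: a nonzero
-- interior cell whose neighbouring row above or below is too short for columns j-1..j+1.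
def Pre_loop (char : List (List Int)) : Prop :=
  ∀ i ∈ PySem.List.pyRange 1 ((char.length : Int) - 1) 1,
    ∀ j ∈ PySem.List.pyRange 1 (((PySem.List.pyGetD char i []).length : Int) - 1) 1,
      PySem.List.pyGetD (PySem.List.pyGetD char i []) j 0 ≠ 0 →
        j + 2 ≤ ((PySem.List.pyGetD char (i - 1) []).length : Int) ∧
        j + 2 ≤ ((PySem.List.pyGetD char (i + 1) []).length : Int)
instance (char : List (List Int)) : Decidable (Pre_loop char) := by unfold Pre_loop; infer_instance

def pvWitness_loop : List (List Int) := [[0, 1, 0], [1, 1, 0], [0, 0, 0]]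

def Spec_loop (char : List (List Int)) (out : Int × Int) : Prop := out = loop_alt char
instance (char : List (List Int)) (out : Int × Int) : Decidable (Spec_loop char out) := by unfold Spec_loop; infer_instance

-- ===== CLAIM (what is proved, stated in full; the proofs are below) =====
def Claim_equal_loop : Prop := ∀ (char : List (List Int)), Dom_loop char → Pre_loop char → Spec_loop char (loop char)

-- ===== LEMMAS AND PROOFS =====

-- range(a-1, a+2) is the three-element window [a-1, a, a+1]
theorem pyRange_window (a : Int) :
    PySem.List.pyRange (a - 1) (a + 2) 1 = [a - 1, a, a + 1] := by
  rw [PySem.List.pyRange_one]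
  have h3 : (a + 2 - (a - 1)).toNat = 3 := by omega
  rw [h3]
  simp [List.range_succ]
  omega

theorem neighbours_eq (char : List (List Int)) (i j : Int) :
    neighbours char i j =
      (PySem.List.pyGetD (PySem.List.pyGetD char (i - 1) []) (j - 1) 0
       + PySem.List.pyGetD (PySem.List.pyGetD char (i - 1) []) j 0
       + PySem.List.pyGetD (PySem.List.pyGetD char (i - 1) []) (j + 1) 0)
      + (PySem.List.pyGetD (PySem.List.pyGetD char i []) (j - 1) 0
       + PySem.List.pyGetD (PySem.List.pyGetD char i []) j 0
       + PySem.List.pyGetD (PySem.List.pyGetD char i []) (j + 1) 0)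
      + (PySem.List.pyGetD (PySem.List.pyGetD char (i + 1) []) (j - 1) 0
       + PySem.List.pyGetD (PySem.List.pyGetD char (i + 1) []) j 0
       + PySem.List.pyGetD (PySem.List.pyGetD char (i + 1) []) (j + 1) 0) := by
  unfold neighbours
  rw [pyRange_window i, pyRange_window j]
  simp [List.foldl]
  ring

theorem prefix_aux (row : List Int) (a : Int) (p : List Int) :
    (row.foldl (fun (st : Int × List Int) v => (st.1 + v, st.2 ++ [st.1 + v])) (a, p)).2
      = p ++ (List.range row.length).map (fun k => a + ((row.take (k + 1)).sum)) := by
  induction row generalizing a p with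
  | nil => simp
  | cons v t ih =>
    simp only [List.foldl_cons]
    rw [ih]
    simp [List.range_succ_eq_map, List.map_map, Function.comp]
    intro k _
    ring

theorem prefixRow_eq (row : List Int) :
    prefixRow row = 0 :: (List.range row.length).map (fun k => (row.take (k + 1)).sum) := by
  unfold prefixRow
  rw [prefix_aux]
  simp

theorem prefixRow_getD (row : List Int) (m : Nat) (hm : m ≤ row.length) :
    (prefixRow row).getD m 0 = (row.take m).sum := by
  rw [prefixRow_eq]
  cases m with
  | zero => simp
  | succ k =>
    have hk : k < row.length := by omega
    simp [List.getD, hk]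

theorem row_window (r : List Int) (j : Int) (h1 : 1 ≤ j) (h2 : j + 2 ≤ (r.length : Int)) :
    PySem.List.pyGetD (prefixRow r) (j + 2) 0 - PySem.List.pyGetD (prefixRow r) (j - 1) 0
      = PySem.List.pyGetD r (j - 1) 0 + PySem.List.pyGetD r j 0 + PySem.List.pyGetD r (j + 1) 0 := by
  obtain ⟨s, rfl⟩ : ∃ s : Nat, j = (s : Int) + 1 := ⟨(j - 1).toNat, by omega⟩
  have hlen : s + 3 ≤ r.length := by omega
  have e1 : (s : Int) + 1 + 2 = ((s + 3 : Nat) : Int) := by push_cast; ring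
  have e2 : (s : Int) + 1 - 1 = ((s : Nat) : Int) := by ring
  have e3 : (s : Int) + 1 = ((s + 1 : Nat) : Int) := by push_cast; ring
  have e4 : ((s + 1 : Nat) : Int) + 1 = ((s + 2 : Nat) : Int) := by push_cast; ring
  rw [e1, e2, e3, e4, PySem.List.pyGetD_natCast, PySem.List.pyGetD_natCast,
      PySem.List.pyGetD_natCast, PySem.List.pyGetD_natCast, PySem.List.pyGetD_natCast,
      prefixRow_getD r (s + 3) hlen, prefixRow_getD r s (by omega)]
  have t3 : (List.take (s + 3) r).sum = (List.take (s + 2) r).sum + r.getD (s + 2) 0 := by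
    rw [List.sum_take_succ r (s + 2) (by omega), List.getD_eq_getElem r 0 (by omega)]
  have t2 : (List.take (s + 2) r).sum = (List.take (s + 1) r).sum + r.getD (s + 1) 0 := by
    rw [List.sum_take_succ r (s + 1) (by omega), List.getD_eq_getElem r 0 (by omega)]
  have t1 : (List.take (s + 1) r).sum = (List.take s r).sum + r.getD s 0 := by
    rw [List.sum_take_succ r s (by omega), List.getD_eq_getElem r 0 (by omega)]
  rw [t3, t2, t1]
  ring

theorem pre_getD (char : List (List Int)) (k : Int) (h0 : 0 ≤ k) (h1 : k < (char.length : Int)) :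
    PySem.List.pyGetD (char.foldl (fun acc row => acc ++ [prefixRow row]) []) k []
      = prefixRow (PySem.List.pyGetD char k []) := by
  obtain ⟨m, rfl⟩ : ∃ m : Nat, k = (m : Int) := ⟨k.toNat, by omega⟩
  have hm : m < char.length := by omega
  rw [PySem.List.foldl_append_singleton_eq_map, List.nil_append,
      PySem.List.pyGetD_natCast, PySem.List.pyGetD_natCast,
      List.getD_eq_getElem _ _ (by simpa using hm), List.getD_eq_getElem _ _ hm,
      List.getElem_map]

-- ===== VERDICT (by name: the statement is the Claim_ definition above) =====
theorem loop_spec : Claim_equal_loop := by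
  intro char _ hpre
  unfold Spec_loop loop loop_alt
  apply PySem.List.foldl_congr_mem
  intro st i hi
  have hi' := PySem.List.mem_pyRange_one.mp hi
  apply PySem.List.foldl_congr_mem
  intro st' j hj
  have hj' := PySem.List.mem_pyRange_one.mp hj
  by_cases hz : PySem.List.pyGetD (PySem.List.pyGetD char i []) j 0 ≠ 0
  · obtain ⟨hup, hdn⟩ := hpre i hi j hj hz
    have hmid : j + 2 ≤ ((PySem.List.pyGetD char i []).length : Int) := by omega
    have hnei :
        PySem.List.pyGetD (PySem.List.pyGetD (char.foldl (fun acc row => acc ++ [prefixRow row]) []) (i - 1) []) (j + 2) 0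
          - PySem.List.pyGetD (PySem.List.pyGetD (char.foldl (fun acc row => acc ++ [prefixRow row]) []) (i - 1) []) (j - 1) 0
          + PySem.List.pyGetD (PySem.List.pyGetD (char.foldl (fun acc row => acc ++ [prefixRow row]) []) i []) (j + 2) 0
          - PySem.List.pyGetD (PySem.List.pyGetD (char.foldl (fun acc row => acc ++ [prefixRow row]) []) i []) (j - 1) 0
          + PySem.List.pyGetD (PySem.List.pyGetD (char.foldl (fun acc row => acc ++ [prefixRow row]) []) (i + 1) []) (j + 2) 0
          - PySem.List.pyGetD (PySem.List.pyGetD (char.foldl (fun acc row => acc ++ [prefixRow row]) []) (i + 1) []) (j - 1) 0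
          = neighbours char i j := by
      rw [pre_getD char (i - 1) (by omega) (by omega),
          pre_getD char i (by omega) (by omega),
          pre_getD char (i + 1) (by omega) (by omega), neighbours_eq]
      have w1 := row_window (PySem.List.pyGetD char (i - 1) []) j (by omega) hup
      have w2 := row_window (PySem.List.pyGetD char i []) j (by omega) hmid
      have w3 := row_window (PySem.List.pyGetD char (i + 1) []) j (by omega) hdn
      linarith [w1, w2, w3]
    simp only [if_pos hz, hnei, tp_joint]
    split_ifs <;> simp_all
  · simp only [if_neg hz]
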